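-- pv_equiv track=rewrite | github.com/Baros16/projet_crypto | package/bibliotheque_gr2.py | reoganiser_colones
-- ===== SOURCE A (Python) =====
-- def reoganiser_colones(matrice,list_entier):
--     if not matrice or not list_entier:
--         return None
--     nb_lignes = len(matrice)
--     lambdaa = [[None for _ in range(len(list_entier))] for _ in range(nb_lignes)]
--     for i in range(nb_lignes):
--         for j, indice_colones in enumerate(list_entier):
--             lambdaa[i][j] = matrice[i][indice_colones]
--     return lambdaa
-- ===== SOURCE B (Python) =====
-- def reoganiser_colones(matrice, list_entier):
--     if not matrice or not list_entier:
--         return None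
--     cols = list(zip(*matrice))                      # materialise the original columns
--     selected = [cols[idx] for idx in list_entier]   # pick columns in the requested order
--     return [list(r) for r in zip(*selected)]        # transpose back to rows
-- ===== Notes on version B (the rewrite author's own statement) =====
-- stated objective: alternative
-- what changed: B transposes the matrix once with zip, selects whole columns by index, and transposes back, instead of A's per-cell double loop into a preallocated table.
-- outside the precondition, e.g. on reoganiser_colones([[1, 2], [3]], [-1]): A returns [[2], [3]], B returns [[1], [3]]
import Mathlib
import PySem

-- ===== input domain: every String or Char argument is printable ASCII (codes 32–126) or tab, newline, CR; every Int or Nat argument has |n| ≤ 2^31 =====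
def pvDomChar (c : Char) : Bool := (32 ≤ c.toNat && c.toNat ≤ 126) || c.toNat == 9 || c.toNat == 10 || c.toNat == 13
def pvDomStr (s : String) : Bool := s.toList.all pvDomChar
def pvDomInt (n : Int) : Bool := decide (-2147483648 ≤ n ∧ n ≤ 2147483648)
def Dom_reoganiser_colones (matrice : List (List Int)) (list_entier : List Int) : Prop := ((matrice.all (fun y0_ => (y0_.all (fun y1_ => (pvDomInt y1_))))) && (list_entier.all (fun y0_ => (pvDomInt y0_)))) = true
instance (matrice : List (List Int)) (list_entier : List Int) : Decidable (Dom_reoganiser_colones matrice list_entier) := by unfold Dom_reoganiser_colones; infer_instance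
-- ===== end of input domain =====

-- B reorders the columns by transposing, selecting whole columns, and transposing back (a different
-- data representation than A's per-cell double loop); equivalence is proved on rectangular matrices
-- whose requested indices are in range.

-- ===== PORT A =====
-- A preallocates a None-table and fills lambdaa[i][j] left to right; the port builds each row in the
-- same traversal order. matrice[i][indice] is pyGetD (in range under Pre_; A raises IndexError outside).
def reoganiser_colones (matrice : List (List Int)) (list_entier : List Int) : Option (List (List Int)) :=
  if matrice.isEmpty || list_entier.isEmpty then none
  else
    let nb_lignes : Int := (matrice.length : Int)
    some ((PySem.List.pyRange 0 nb_lignes 1).foldl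
      (fun lambdaa i =>
        lambdaa ++ [(PySem.List.enumerate list_entier).foldl
          (fun row p => row ++ [PySem.List.pyGetD (PySem.List.pyGetD matrice i []) p.2 0]) []])
      [])

-- ===== PORT B =====
-- zip(*m): truncating transpose, exactly Python's zip semantics.
def pyZipStar (m : List (List Int)) : List (List Int) :=
  if h : m = [] ∨ m.any (·.isEmpty) then []
  else (m.map (fun r => r.headD 0)) :: pyZipStar (m.map (fun r => r.tail))
termination_by ((m.headD []).length)
decreasing_by
  cases m with
  | nil => exact absurd (Or.inl rfl) h
  | cons r rs =>
    cases r with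
    | nil => exact absurd (Or.inr (by simp)) h
    | cons a t => simp

-- cols[idx] is pyGetD (in range under Pre_; B raises IndexError outside, exactly where A does).
def reoganiser_colones_alt (matrice : List (List Int)) (list_entier : List Int) : Option (List (List Int)) :=
  if matrice.isEmpty || list_entier.isEmpty then none
  else
    let cols := pyZipStar matrice
    let selected := list_entier.map (fun idx => PySem.List.pyGetD cols idx [])
    some (pyZipStar selected)

-- ===== PRECONDITION & SPEC =====
-- Pre_ excludes inputs where A raises IndexError (an index out of range of some row), and ragged
-- (unequal-row-length) matrices, on which zip's truncation and negative-index wraparound make A's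
-- per-row value an artefact no caller of a matrix routine relies on.
def Pre_reoganiser_colones (matrice : List (List Int)) (list_entier : List Int) : Prop :=
  matrice = [] ∨ list_entier = [] ∨
    ((∀ r ∈ matrice, r.length = (matrice.headD []).length) ∧
     ∀ i ∈ list_entier, PySem.Raise.InRange (matrice.headD []).length i)
instance (matrice : List (List Int)) (list_entier : List Int) : Decidable (Pre_reoganiser_colones matrice list_entier) := by unfold Pre_reoganiser_colones; infer_instance

def pvWitness_reoganiser_colones : List (List Int) × List Int := ([[1, 2, 3], [4, 5, 6]], [2, 0, -1])

def Spec_reoganiser_colones (matrice : List (List Int)) (list_entier : List Int) (out : Option (List (List Int))) : Prop := out = reoganiser_colones_alt matrice list_entier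
instance (matrice : List (List Int)) (list_entier : List Int) (out : Option (List (List Int))) : Decidable (Spec_reoganiser_colones matrice list_entier out) := by unfold Spec_reoganiser_colones; infer_instance

-- ===== CLAIM (what is proved, stated in full; the proofs are below) =====
def Claim_equal_reoganiser_colones : Prop := ∀ (matrice : List (List Int)) (list_entier : List Int), Dom_reoganiser_colones matrice list_entier → Pre_reoganiser_colones matrice list_entier → Spec_reoganiser_colones matrice list_entier (reoganiser_colones matrice list_entier)

-- ===== LEMMAS AND PROOFS =====

-- the common value of both ports on Pre_ (proof-only helper)
def pvTarget (m : List (List Int)) (l : List Int) : List (List Int) :=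
  m.map (fun row => l.map (fun idx => PySem.List.pyGetD row idx 0))

theorem tail_getD (r : List Int) (j : Nat) (d : Int) : r.tail.getD j d = r.getD (j + 1) d := by
  cases r <;> simp [List.getD]

theorem map_eq_range_map (m : List (List Int)) (f : List Int → List Int) :
    m.map f = (List.range m.length).map (fun i => f (m.getD i [])) := by
  induction m with
  | nil => simp
  | cons r rs ih =>
    simp [List.range_succ_eq_map, ih, List.map_map, Function.comp, List.getD]

theorem pyZipStar_spec (w : Nat) (m : List (List Int)) (hm : m ≠ [])
    (hw : ∀ r ∈ m, r.length = w) :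
    pyZipStar m = (List.range w).map (fun j => m.map (fun r => r.getD j 0)) := by
  induction w generalizing m with
  | zero =>
    rw [pyZipStar]
    have : m.any (·.isEmpty) = true := by
      cases m with
      | nil => exact absurd rfl hm
      | cons r rs =>
        simp only [List.any_cons, Bool.or_eq_true]
        left
        simpa using List.length_eq_zero_iff.mp (hw r (by simp))
    simp [this]
  | succ n ih =>
    rw [pyZipStar]
    have hne : ¬ (m = [] ∨ m.any (·.isEmpty) = true) := by
      rintro (h | h)
      · exact hm h
      · obtain ⟨r, hr, he⟩ := List.any_eq_true.mp h
        have := hw r hr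
        simp [List.isEmpty_iff] at he
        simp [he] at this
    rw [dif_neg hne]
    have hmt : m.map (fun r => r.tail) ≠ [] := by simpa using hm
    have hwt : ∀ r ∈ m.map (fun r => r.tail), r.length = n := by
      intro r hr
      obtain ⟨s, hs, rfl⟩ := List.mem_map.mp hr
      have := hw s hs
      simp [this]
    rw [ih _ hmt hwt, List.range_succ_eq_map]
    simp only [List.map_cons, List.map_map]
    congr 1
    · apply List.map_congr_left
      intro r hr
      have := hw r hr
      cases r with
      | nil => simp at this
      | cons a t => simp [List.getD]
    · apply List.map_congr_left
      intro j hj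
      simp only [Function.comp]
      apply List.map_congr_left
      intro r hr
      exact tail_getD r j 0

theorem pyGetD_col (w : Nat) (m : List (List Int)) (idx : Int)
    (_hm : m ≠ []) (hw : ∀ r ∈ m, r.length = w)
    (hin : PySem.Raise.InRange w idx) :
    PySem.List.pyGetD ((List.range w).map (fun j => m.map (fun r => r.getD j 0))) idx []
      = m.map (fun r => PySem.List.pyGetD r idx 0) := by
  have hlen : ((List.range w).map (fun j => m.map (fun r => r.getD j 0))).length = w := by simp
  by_cases hpos : 0 ≤ idx
  · have hlt : idx < (w : Int) := hin.2
    have hlt' : idx.toNat < w := by omega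
    rw [PySem.List.pyGetD_eq_getElem _ _ hpos (by omega)]
    simp only [List.getElem_map, List.getElem_range]
    apply List.map_congr_left
    intro r hr
    have hrw := hw r hr
    rw [PySem.List.pyGetD_eq_getElem _ _ hpos (by omega)]
    rw [List.getD_eq_getElem r 0 (by omega)]
  · have hk0 : 0 < (-idx).toNat := by omega
    have hkw : (-idx).toNat ≤ w := by
      have := hin.1
      omega
    have hidx : idx = -(((-idx).toNat : Nat) : Int) := by omega
    rw [hidx, PySem.List.pyGetD_neg_natCast _ _ _ hk0 (by omega)]
    simp only [hlen, List.getElem_map, List.getElem_range]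
    apply List.map_congr_left
    intro r hr
    have hrw := hw r hr
    rw [PySem.List.pyGetD_neg_natCast _ _ _ hk0 (by omega)]
    rw [List.getD_eq_getElem r 0 (by omega)]
    simp [hrw]

theorem portA_eval (m : List (List Int)) (l : List Int) (hm : m ≠ []) (hl : l ≠ []) :
    reoganiser_colones m l = some (pvTarget m l) := by
  unfold reoganiser_colones pvTarget
  rw [if_neg (by simp [hm, hl])]
  dsimp only
  congr 1
  rw [PySem.List.foldl_append_singleton_eq_map, List.nil_append]
  have hinner : ∀ i : Int,
      (PySem.List.enumerate l).foldl
        (fun row p => row ++ [PySem.List.pyGetD (PySem.List.pyGetD m i []) p.2 0]) []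
      = l.map (fun idx => PySem.List.pyGetD (PySem.List.pyGetD m i []) idx 0) := by
    intro i
    rw [PySem.List.foldl_append_singleton_eq_map, List.nil_append]
    rw [show (fun p : Int × Int => PySem.List.pyGetD (PySem.List.pyGetD m i []) p.2 0)
        = (fun idx => PySem.List.pyGetD (PySem.List.pyGetD m i []) idx 0) ∘ (fun p : Int × Int => p.2) from rfl]
    rw [← List.map_map, PySem.List.map_snd_enumerate]
  simp only [hinner]
  rw [show (fun i : Int => l.map (fun idx => PySem.List.pyGetD (PySem.List.pyGetD m i []) idx 0))
      = (fun row => l.map (fun idx => PySem.List.pyGetD row idx 0)) ∘ (fun i : Int => PySem.List.pyGetD m i []) from rfl]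
  rw [← List.map_map, PySem.List.map_pyGetD_pyRange_zero']

theorem portB_eval (m : List (List Int)) (l : List Int) (hm : m ≠ []) (hl : l ≠ [])
    (hrect : ∀ r ∈ m, r.length = (m.headD []).length)
    (hin : ∀ i ∈ l, PySem.Raise.InRange (m.headD []).length i) :
    reoganiser_colones_alt m l = some (pvTarget m l) := by
  set w := (m.headD []).length with hwdef
  unfold reoganiser_colones_alt
  rw [if_neg (by simp [hm, hl])]
  dsimp only
  congr 1
  rw [pyZipStar_spec w m hm hrect]
  have hsel : l.map (fun idx => PySem.List.pyGetD ((List.range w).map (fun j => m.map (fun r => r.getD j 0))) idx [])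
      = l.map (fun idx => m.map (fun r => PySem.List.pyGetD r idx 0)) := by
    apply List.map_congr_left
    intro idx hidx
    exact pyGetD_col w m idx hm hrect (hin idx hidx)
  rw [hsel]
  have hselne : l.map (fun idx => m.map (fun r => PySem.List.pyGetD r idx 0)) ≠ [] := by
    simpa using hl
  have hsellen : ∀ c ∈ l.map (fun idx => m.map (fun r => PySem.List.pyGetD r idx 0)), c.length = m.length := by
    intro c hc
    obtain ⟨idx, _, rfl⟩ := List.mem_map.mp hc
    simp
  rw [pyZipStar_spec m.length _ hselne hsellen]
  unfold pvTarget
  rw [map_eq_range_map m (fun row => l.map (fun idx => PySem.List.pyGetD row idx 0))]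
  apply List.map_congr_left
  intro i hi
  have hilt : i < m.length := List.mem_range.mp hi
  simp only [List.map_map]
  apply List.map_congr_left
  intro idx _
  rw [List.getD_eq_getElem _ [] (by simpa using hilt)]
  simp [hilt]

-- ===== VERDICT (by name: the statement is the Claim_ definition above) =====
theorem reoganiser_colones_spec : Claim_equal_reoganiser_colones := by
  intro m l _ hpre
  unfold Spec_reoganiser_colones
  by_cases hm : m = []
  · subst hm; rfl
  by_cases hl : l = []
  · subst hl
    unfold reoganiser_colones reoganiser_colones_alt
    simp
  rcases hpre with h | h | ⟨hrect, hin⟩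
  · exact absurd h hm
  · exact absurd h hl
  · rw [portA_eval m l hm hl, portB_eval m l hm hl hrect hin]
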